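-- pv_equiv track=rewrite | github.com/NicholasARossi/generative_artforms | glyphs/utilities.py | find_repeated_locs
-- ===== SOURCE A (Python) =====
-- def find_repeated_locs(input_list):
--     repeated_nums = {}
--
--     for index, num in enumerate(input_list):
--         if num in repeated_nums:
--             repeated_nums[num].append(index)
--         else:
--             repeated_nums[num] = [index]
--
--     max_delta = 0
--     deltas = {}
--     for k,v in repeated_nums.items():
--         if len(v)>1:
--             delta = v[1]-v[0]
--             if delta>max_delta:
--                 max_delta=delta
--                 locs = v
--     if max_delta == 0:
--         locs = [0,len(input_list)]
--
--     return locs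
-- ===== SOURCE B (Python) =====
-- def find_repeated_locs(input_list):
--     # One pass: remember each value's first index; when a value shows up the
--     # second time, compare its first-two-occurrence gap against the best so far
--     # (strict '>' keeps the earliest winner).  A second pass gathers the
--     # winner's indices; [0, len] if nothing repeats.
--     first = {}
--     best = None  # (delta, value)
--     for i, x in enumerate(input_list):
--         if x not in first:
--             first[x] = i
--         elif first[x] is not None:
--             d = i - first[x]
--             first[x] = None  # handled: ignore third and later occurrences
--             if best is None or d > best[0]:
--                 best = (d, x)
--     if best is None:
--         return [0, len(input_list)]
--     v = best[1]
--     return [i for i, x in enumerate(input_list) if x == v]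
-- ===== Notes on version B (the rewrite author's own statement) =====
-- stated objective: alternative
-- what changed: Instead of grouping all indices per value into a dict of lists and then scanning the dict for the largest first-two-occurrence gap, B keeps only each value's first index, computes the gap online the moment a value repeats (strict '>' keeps A's tie-break), and re-scans the input once to collect the winner's indices.
import Mathlib
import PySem

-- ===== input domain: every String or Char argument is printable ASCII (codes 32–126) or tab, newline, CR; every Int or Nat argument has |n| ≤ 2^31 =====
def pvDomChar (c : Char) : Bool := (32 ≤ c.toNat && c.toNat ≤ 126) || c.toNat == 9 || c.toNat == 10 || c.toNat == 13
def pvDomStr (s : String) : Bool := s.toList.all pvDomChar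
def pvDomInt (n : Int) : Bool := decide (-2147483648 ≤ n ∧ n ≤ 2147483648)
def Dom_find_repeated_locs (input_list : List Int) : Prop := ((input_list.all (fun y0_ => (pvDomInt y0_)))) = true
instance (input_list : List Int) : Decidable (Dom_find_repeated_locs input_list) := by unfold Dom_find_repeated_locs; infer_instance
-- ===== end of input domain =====

-- B replaces A's dict of full index lists plus dict-scan argmax by a single pass keeping only each
-- value's first index and the best (gap, value) so far, plus one re-scan for the winner's indices.

-- ===== PORT A =====
def find_repeated_locs (input_list : List Int) : List Int :=
  let repeated_nums := (PySem.List.enumerate input_list 0).foldl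
    (fun d p =>
      if d.contains p.2 then d.insert p.2 (d.getD p.2 [] ++ [p.1])
      else d.insert p.2 [p.1]) PySem.Dict.empty
  let st := repeated_nums.items.foldl
    (fun (st : Int × List Int) kv =>
      if 1 < kv.2.length then
        let delta := PySem.List.pyGetD kv.2 1 0 - PySem.List.pyGetD kv.2 0 0
        if delta > st.1 then (delta, kv.2) else st
      else st) ((0 : Int), ([] : List Int))
  if st.1 = 0 then [0, (input_list.length : Int)] else st.2

-- ===== PORT B =====
def find_repeated_locs_alt (input_list : List Int) : List Int :=
  let st := (PySem.List.enumerate input_list 0).foldl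
    (fun (st : PySem.Dict Int (Option Int) × Option (Int × Int)) p =>
      match st.1.get? p.2 with
      | none => (st.1.insert p.2 (some p.1), st.2)
      | some none => st
      | some (some f) =>
          let d := p.1 - f
          let best' := match st.2 with
            | none => some (d, p.2)
            | some b => if d > b.1 then some (d, p.2) else some b
          (st.1.insert p.2 none, best'))
    (PySem.Dict.empty, none)
  match st.2 with
  | none => [0, (input_list.length : Int)]
  | some b => (PySem.List.enumerate input_list 0).filterMap
      (fun p => if p.2 = b.2 then some p.1 else none)

-- ===== PRECONDITION & SPEC =====
def Spec_find_repeated_locs (input_list : List Int) (out : List Int) : Prop := out = find_repeated_locs_alt input_list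
instance (input_list : List Int) (out : List Int) : Decidable (Spec_find_repeated_locs input_list out) := by unfold Spec_find_repeated_locs; infer_instance

-- ===== CLAIM (what is proved, stated in full; the proofs are below) =====
def Claim_equal_find_repeated_locs : Prop := ∀ (input_list : List Int), Dom_find_repeated_locs input_list → Spec_find_repeated_locs input_list (find_repeated_locs input_list)

-- ===== LEMMAS AND PROOFS =====
def pvOcc (l : List Int) (v : Int) : List Int :=
  ((PySem.List.enumerate l 0).filter (fun p => p.2 == v)).map (fun p => p.1)
lemma pvOcc_append (l : List Int) (x v : Int) :
    pvOcc (l ++ [x]) v = pvOcc l v ++ (if x = v then [(l.length : Int)] else []) := by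
  simp [pvOcc, PySem.List.enumerate_append, PySem.List.enumerate_cons, PySem.List.enumerate_nil,
    List.filter_append]
  by_cases h : x = v <;> simp [h]
lemma pvOcc_length (l : List Int) (v : Int) : (pvOcc l v).length = l.count v := by
  induction l using List.reverseRecOn with
  | nil => rfl
  | append_singleton l x ih =>
      rw [pvOcc_append]
      by_cases h : x = v <;>
        simp [h, List.count_append, ih]
lemma pvOcc_bounds (l : List Int) (v : Int) : ∀ i ∈ pvOcc l v, 0 ≤ i ∧ i < (l.length : Int) := by
  induction l using List.reverseRecOn with
  | nil => simp [pvOcc]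
  | append_singleton l x ih =>
      rw [pvOcc_append]
      intro i hi
      rcases List.mem_append.1 hi with h | h
      · have := ih i h; simp; omega
      · by_cases hx : x = v
        · simp [hx] at h; subst h; simp
        · simp [hx] at h
lemma pvOcc_pairwise (l : List Int) (v : Int) : (pvOcc l v).Pairwise (· < ·) := by
  exact List.Pairwise.map _ (fun a b h => h)
    ((PySem.List.pairwise_lt_enumerate l 0).filter _)
def pvFst (l : List Int) (v : Int) : Int := (pvOcc l v).getD 0 0
def pvSnd (l : List Int) (v : Int) : Int := (pvOcc l v).getD 1 0
def pvDlt (l : List Int) (v : Int) : Int := pvSnd l v - pvFst l v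
lemma pvFst_mem (l : List Int) (v : Int) (h : v ∈ l) : pvFst l v ∈ pvOcc l v := by
  have hl : 0 < (pvOcc l v).length := by
    rw [pvOcc_length]; exact List.count_pos_iff.2 h
  rw [pvFst, List.getD_eq_getElem _ _ hl]
  exact List.getElem_mem hl
lemma pvSnd_mem (l : List Int) (v : Int) (h : 1 < (pvOcc l v).length) : pvSnd l v ∈ pvOcc l v := by
  rw [pvSnd, List.getD_eq_getElem _ _ h]
  exact List.getElem_mem h
lemma pvFst_append (l : List Int) (x v : Int) (h : v ∈ l) : pvFst (l ++ [x]) v = pvFst l v := by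
  have hl : 0 < (pvOcc l v).length := by
    rw [pvOcc_length]; exact List.count_pos_iff.2 h
  rw [pvFst, pvFst, pvOcc_append, List.getD_append _ _ _ _ hl]
lemma pvSnd_append (l : List Int) (x v : Int) (h : 1 < (pvOcc l v).length) :
    pvSnd (l ++ [x]) v = pvSnd l v := by
  rw [pvSnd, pvSnd, pvOcc_append, List.getD_append _ _ _ _ h]
lemma pvDlt_append (l : List Int) (x v : Int) (h : 1 < (pvOcc l v).length) :
    pvDlt (l ++ [x]) v = pvDlt l v := by
  have hm : v ∈ l := by
    have := pvOcc_length l v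
    have : 0 < l.count v := by omega
    exact List.count_pos_iff.1 this
  rw [pvDlt, pvDlt, pvSnd_append _ _ _ h, pvFst_append _ _ _ hm]
lemma pvFst_new (l : List Int) (x : Int) (h : x ∉ l) : pvFst (l ++ [x]) x = (l.length : Int) := by
  have h0 : pvOcc l x = [] := by
    have := pvOcc_length l x
    have hc : l.count x = 0 := List.count_eq_zero.2 h
    exact List.eq_nil_of_length_eq_zero (by omega)
  rw [pvFst, pvOcc_append, h0]; simp
lemma pvSnd_new (l : List Int) (x : Int) (h : l.count x = 1) :
    pvSnd (l ++ [x]) x = (l.length : Int) := by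
  have h1 : (pvOcc l x).length = 1 := by rw [pvOcc_length, h]
  rw [pvSnd, pvOcc_append, if_pos rfl]
  rcases List.length_eq_one_iff.1 h1 with ⟨a, ha⟩
  rw [ha]; rfl
lemma pvDlt_pos (l : List Int) (v : Int) (h : 1 < (pvOcc l v).length) : 1 ≤ pvDlt l v := by
  have hp := pvOcc_pairwise l v
  rw [List.pairwise_iff_getElem] at hp
  have h01 := hp 0 1 (by omega) h (by omega)
  rw [pvDlt, pvSnd, pvFst, List.getD_eq_getElem _ _ h, List.getD_eq_getElem _ _ (by omega)]
  omega
def pvVsA (l : List Int) : List Int :=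
  (PySem.Set.ofList l).filter (fun v => decide (1 < (pvOcc l v).length))
lemma pvOfList_pairwise (l : List Int) :
    (PySem.Set.ofList l).Pairwise (fun u w => pvFst l u < pvFst l w) := by
  induction l using List.reverseRecOn with
  | nil => simp [PySem.Set.ofList]
  | append_singleton l x ih =>
      rw [PySem.Set.ofList_append_singleton]
      by_cases hx : x ∈ l
      · rw [PySem.Set.add_of_mem (by simpa [PySem.Set.mem_ofList] using hx)]
        refine ih.imp_of_mem ?_
        intro a b ha hb hab
        have ha' : a ∈ l := (PySem.Set.mem_ofList _ _).1 ha
        have hb' : b ∈ l := (PySem.Set.mem_ofList _ _).1 hb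
        rwa [pvFst_append _ _ _ ha', pvFst_append _ _ _ hb']
      · rw [PySem.Set.add_of_not_mem (by simpa [PySem.Set.mem_ofList] using hx)]
        rw [List.pairwise_append]
        refine ⟨ih.imp_of_mem ?_, by simp, ?_⟩
        · intro a b ha hb hab
          have ha' : a ∈ l := (PySem.Set.mem_ofList _ _).1 ha
          have hb' : b ∈ l := (PySem.Set.mem_ofList _ _).1 hb
          rwa [pvFst_append _ _ _ ha', pvFst_append _ _ _ hb']
        · intro a ha b hb
          have ha' : a ∈ l := (PySem.Set.mem_ofList _ _).1 ha
          have hb' : b = x := by simpa using hb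
          subst hb'
          rw [pvFst_append _ _ _ ha', pvFst_new _ _ hx]
          exact (pvOcc_bounds l a (pvFst l a) (pvFst_mem l a ha')).2
lemma pvVsA_pairwise (l : List Int) :
    (pvVsA l).Pairwise (fun u w => pvFst l u < pvFst l w) :=
  (pvOfList_pairwise l).filter _
lemma pvVsA_mem (l : List Int) (v : Int) :
    v ∈ pvVsA l ↔ v ∈ l ∧ 1 < (pvOcc l v).length := by
  simp [pvVsA, List.mem_filter, PySem.Set.mem_ofList]
lemma pvVsA_nodup (l : List Int) : (pvVsA l).Nodup :=
  (PySem.Set.nodup_ofList l).filter _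
lemma pvItemsA (l : List Int) :
    ((PySem.List.enumerate l 0).foldl
      (fun d p =>
        if d.contains p.2 then d.insert p.2 (d.getD p.2 [] ++ [p.1])
        else d.insert p.2 [p.1]) PySem.Dict.empty).items
    = (PySem.Set.ofList l).map (fun v => (v, pvOcc l v)) := by
  have hstep : (fun (d : PySem.Dict Int (List Int)) (p : Int × Int) =>
      if d.contains p.2 then d.insert p.2 (d.getD p.2 [] ++ [p.1])
      else d.insert p.2 [p.1])
      = (fun d p => d.modify p.2 [] (fun xs => xs ++ [p.1])) := by
    funext d p
    by_cases h : d.contains p.2 = true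
    · simp [h, PySem.Dict.modify]
    · have h' : d.contains p.2 = false := by simpa using h
      simp [h', PySem.Dict.modify, PySem.Dict.getD_of_not_contains]
  rw [hstep]
  have hkeys : ((PySem.List.enumerate l 0).foldl
      (fun d p => d.modify p.2 [] (fun xs => xs ++ [p.1])) PySem.Dict.empty).keys
      = PySem.Set.ofList l := by
    rw [PySem.Dict.keys_foldl_modify_key (PySem.List.enumerate l 0) (fun p => p.2) []
      (fun _ p => fun xs => xs ++ [p.1]) PySem.Dict.empty]
    simp [PySem.List.map_snd_enumerate, PySem.Set.update_nil_left]
  have hnodup : ((PySem.List.enumerate l 0).foldl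
      (fun d p => d.modify p.2 [] (fun xs => xs ++ [p.1])) PySem.Dict.empty).keys.Nodup := by
    apply PySem.Dict.nodup_keys_foldl_modify_key (PySem.List.enumerate l 0) (fun p => p.2) []
      (fun _ p => fun xs => xs ++ [p.1]) PySem.Dict.empty
    simp
  have hget : ∀ v, ((PySem.List.enumerate l 0).foldl
      (fun d p => d.modify p.2 [] (fun xs => xs ++ [p.1])) PySem.Dict.empty).getD v []
      = pvOcc l v := by
    intro v
    have hswap : (PySem.List.enumerate l 0).foldl
        (fun d p => d.modify p.2 [] (fun xs => xs ++ [p.1])) PySem.Dict.empty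
        = (((PySem.List.enumerate l 0).map (fun p => (p.2, p.1))).foldl
            (fun d q => d.modify q.1 [] (fun xs => xs ++ [q.2])) PySem.Dict.empty) := by
      rw [List.foldl_map]
    rw [hswap, PySem.Dict.getD_foldl_modify_append]
    rw [List.filter_map]
    simp [pvOcc, List.map_map, PySem.Dict.getD_empty, Function.comp_def]
  rw [PySem.Dict.items_eq_map_keys _ hnodup [], hkeys]
  apply List.map_congr_left
  intro v _
  rw [hget v]
def pvPick {α : Type} (cs : List (Int × α)) : Option (Int × α) :=
  cs.foldl (fun b c => match b with
    | none => some c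
    | some b => if c.1 > b.1 then some c else some b) none
lemma pvPick_some_foldl {α : Type} (cs : List (Int × α)) (a : Int × α) :
    List.foldl (fun (b : Option (Int × α)) c => match b with
      | none => some c
      | some b => if c.1 > b.1 then some c else some b) (some a) cs
    = some (List.foldl (fun (st : Int × α) c => if c.1 > st.1 then c else st) a cs) := by
  induction cs generalizing a with
  | nil => rfl
  | cons c cs ih =>
      by_cases h : c.1 > a.1 <;> simp [h, ih]
lemma pvPick_foldl {α : Type} (cs : List (Int × α)) (d : α) (h : ∀ c ∈ cs, 1 ≤ c.1) :
    List.foldl (fun (st : Int × α) c => if c.1 > st.1 then c else st) (0, d) cs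
      = (pvPick cs).getD (0, d) := by
  cases cs with
  | nil => rfl
  | cons c cs =>
      have hc : (1 : Int) ≤ c.1 := h c (by simp)
      have h0 : c.1 > (0, d).1 := by simpa using by omega
      rw [List.foldl_cons, if_pos h0, pvPick, List.foldl_cons]
      show _ = (List.foldl _ (some c) cs).getD (0, d)
      rw [pvPick_some_foldl]
      rfl
lemma pvPick_spec {α : Type} (cs : List (Int × α)) (h : cs ≠ []) :
    ∃ k, ∃ hk : k < cs.length, pvPick cs = some cs[k] ∧
      (∀ j (hj : j < cs.length), cs[j].1 ≤ cs[k].1) ∧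
      (∀ j (hj : j < k), cs[j].1 < cs[k].1) := by
  induction cs using List.reverseRecOn with
  | nil => exact absurd rfl h
  | append_singleton cs c ih =>
      rcases eq_or_ne cs [] with rfl | hne
      · exact ⟨0, by simp, by simp [pvPick], by simp, by simp⟩
      · obtain ⟨k, hk, hpick, hmax, hlt⟩ := ih hne
        have happ : pvPick (cs ++ [c]) = if c.1 > cs[k].1 then some c else some cs[k] := by
          rw [pvPick, List.foldl_append, ← pvPick, hpick]
          simp only [List.foldl_cons, List.foldl_nil]
        by_cases hgt : c.1 > cs[k].1
        · refine ⟨cs.length, by simp, ?_, ?_, ?_⟩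
          · rw [happ, if_pos hgt]; simp
          · intro j hj
            simp only [List.length_append, List.length_singleton] at hj
            rcases Nat.lt_or_ge j cs.length with hj' | hj'
            · rw [List.getElem_append_left hj', List.getElem_append_right (by omega)]
              simp only [List.length_append] at *
              have := hmax j hj'
              simp only [show cs.length - cs.length = 0 from by omega]
              simp only [List.getElem_singleton]
              omega
            · have : j = cs.length := by omega
              subst this
              rw [List.getElem_append_right (by omega)]
          · intro j hj
            rw [List.getElem_append_left hj, List.getElem_append_right (by omega)]
            have := hmax j hj
            simp only [show cs.length - cs.length = 0 from by omega, List.getElem_singleton]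
            omega
        · refine ⟨k, by simp; omega, ?_, ?_, ?_⟩
          · rw [happ, if_neg hgt, List.getElem_append_left hk]
          · intro j hj
            simp only [List.length_append, List.length_singleton] at hj
            rw [List.getElem_append_left hk]
            rcases Nat.lt_or_ge j cs.length with hj' | hj'
            · rw [List.getElem_append_left hj']
              exact hmax j hj'
            · have : j = cs.length := by omega
              subst this
              rw [List.getElem_append_right (by omega)]
              simp only [show cs.length - cs.length = 0 from by omega, List.getElem_singleton]
              omega
          · intro j hj
            rw [List.getElem_append_left hk, List.getElem_append_left (by omega)]
            exact hlt j hj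
lemma pvFold_max_map {α β : Type} (g : α → β) (cs : List (Int × α)) (a : Int × α) :
    List.foldl (fun (st : Int × β) c => if c.1 > st.1 then c else st) (a.1, g a.2)
        (cs.map (fun c => (c.1, g c.2)))
      = ((List.foldl (fun (st : Int × α) c => if c.1 > st.1 then c else st) a cs).1,
         g (List.foldl (fun (st : Int × α) c => if c.1 > st.1 then c else st) a cs).2) := by
  induction cs generalizing a with
  | nil => rfl
  | cons e es ih =>
      by_cases h : e.1 > a.1 <;> simp only [List.map_cons, List.foldl_cons, h, ite_true, ite_false, gt_iff_lt]
      · exact ih e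
      · exact ih a
lemma pvPick_map {α β : Type} (g : α → β) (cs : List (Int × α)) :
    pvPick (cs.map (fun c => (c.1, g c.2))) = (pvPick cs).map (fun c => (c.1, g c.2)) := by
  cases cs with
  | nil => rfl
  | cons c cs =>
      rw [pvPick, pvPick, List.map_cons, List.foldl_cons, List.foldl_cons]
      show List.foldl _ (some (c.1, g c.2)) _ = _
      rw [pvPick_some_foldl, pvPick_some_foldl]
      simp only [Option.map_some]
      rw [pvFold_max_map g cs c]
lemma pvSnd_eq (l : List Int) (v : Int) : pvSnd l v = pvFst l v + pvDlt l v := by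
  rw [pvDlt]; ring
lemma pvPick_bridge (l : List Int) (vsB : List Int)
    (hp : vsB.Perm (pvVsA l))
    (hB : vsB.Pairwise (fun u w => pvSnd l u < pvSnd l w)) :
    pvPick ((pvVsA l).map (fun v => (pvDlt l v, v))) = pvPick (vsB.map (fun v => (pvDlt l v, v))) := by
  rcases eq_or_ne (pvVsA l) [] with hA0 | hA0
  · have : vsB = [] := List.eq_nil_of_length_eq_zero (by
      have := hp.length_eq; rw [hA0] at this; simpa using this)
    rw [hA0, this]
  · have hB0 : vsB ≠ [] := by
      intro h; rw [h] at hp; exact hA0 (hp.nil_eq).symm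
    obtain ⟨kA, hkA, hpA, hmaxA, hltA⟩ := pvPick_spec ((pvVsA l).map (fun v => (pvDlt l v, v)))
      (by simpa using hA0)
    obtain ⟨kB, hkB, hpB, hmaxB, hltB⟩ := pvPick_spec (vsB.map (fun v => (pvDlt l v, v)))
      (by simpa using hB0)
    rw [hpA, hpB]
    simp only [List.length_map] at hkA hkB hmaxA hmaxB hltA hltB
    simp only [List.getElem_map] at hpA hpB hmaxA hmaxB hltA hltB ⊢
    set a := (pvVsA l)[kA] with ha
    set b := vsB[kB] with hb
    -- a is the max-gap value with the smallest first occurrence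
    have hamem : a ∈ pvVsA l := by rw [ha]; exact List.getElem_mem hkA
    have hbmem : b ∈ vsB := by rw [hb]; exact List.getElem_mem hkB
    have hmaxA' : ∀ u ∈ pvVsA l, pvDlt l u ≤ pvDlt l a := by
      intro u hu
      obtain ⟨j, hj, rfl⟩ := List.mem_iff_getElem.1 hu
      exact hmaxA j hj
    have hmaxB' : ∀ u ∈ vsB, pvDlt l u ≤ pvDlt l b := by
      intro u hu
      obtain ⟨j, hj, rfl⟩ := List.mem_iff_getElem.1 hu
      exact hmaxB j hj
    have hminA : ∀ u ∈ pvVsA l, pvDlt l u = pvDlt l a → u ≠ a → pvFst l a < pvFst l u := by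
      intro u hu hd hne
      obtain ⟨j, hj, rfl⟩ := List.mem_iff_getElem.1 hu
      rcases Nat.lt_trichotomy j kA with h | h | h
      · exact absurd hd (by have := hltA j h; omega)
      · subst h; exact absurd ha.symm hne
      · exact (List.pairwise_iff_getElem.1 (pvVsA_pairwise l)) kA j hkA hj h
    have hminB : ∀ u ∈ vsB, pvDlt l u = pvDlt l b → u ≠ b → pvSnd l b < pvSnd l u := by
      intro u hu hd hne
      obtain ⟨j, hj, rfl⟩ := List.mem_iff_getElem.1 hu
      rcases Nat.lt_trichotomy j kB with h | h | h
      · exact absurd hd (by have := hltB j h; omega)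
      · subst h; exact absurd hb.symm hne
      · exact (List.pairwise_iff_getElem.1 hB) kB j hkB hj h
    have hdeq : pvDlt l a = pvDlt l b := by
      have h1 := hmaxB' a (hp.symm.subset hamem)
      have h2 := hmaxA' b (hp.subset hbmem)
      omega
    have hab : a = b := by
      by_contra hne
      have h1 := hminA b (hp.subset hbmem) hdeq.symm (Ne.symm hne)
      have h2 := hminB a (hp.symm.subset hamem) hdeq hne
      rw [pvSnd_eq, pvSnd_eq, hdeq] at h2
      omega
    rw [hab]
def pvSecs (l : List Int) : List (Int × Int) :=
  (List.range l.length).filterMap (fun i =>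
    if (l.take i).count (l.getD i 0) = 1
    then some (((i : Nat) : Int) - pvFst l (l.getD i 0), l.getD i 0) else none)
lemma pvSecs_append (l : List Int) (x : Int) :
    pvSecs (l ++ [x]) = pvSecs l ++
      (if l.count x = 1 then [((l.length : Int) - pvFst l x, x)] else []) := by
  rw [pvSecs, List.length_append, List.length_singleton, List.range_succ, List.filterMap_append]
  congr 1
  · rw [pvSecs]
    apply List.filterMap_congr
    intro i hi
    have hi' : i < l.length := List.mem_range.1 hi
    have hget : (l ++ [x]).getD i 0 = l.getD i 0 := List.getD_append _ _ _ _ hi'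
    have htake : (l ++ [x]).take i = l.take i := List.take_append_of_le_length (by omega)
    rw [hget, htake]
    by_cases hc : (l.take i).count (l.getD i 0) = 1
    · rw [if_pos hc, if_pos hc]
      have hmem : l.getD i 0 ∈ l :=
        List.take_subset i l (List.count_pos_iff.1 (by omega))
      rw [pvFst_append _ _ _ hmem]
    · rw [if_neg hc, if_neg hc]
  · have hget : (l ++ [x]).getD l.length 0 = x := by
      rw [List.getD_eq_getElem?_getD, List.getElem?_concat_length]; rfl
    have htake : (l ++ [x]).take l.length = l := List.take_left
    simp only [List.filterMap_cons, List.filterMap_nil, hget, htake]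
    by_cases hc : l.count x = 1
    · rw [if_pos hc, if_pos hc]
      have hmem : x ∈ l := List.count_pos_iff.1 (by omega)
      rw [pvFst_append _ _ _ hmem]
    · rw [if_neg hc, if_neg hc]
lemma pvSecs_spec (l : List Int) :
    ∃ vsB : List Int, pvSecs l = vsB.map (fun v => (pvDlt l v, v)) ∧
      vsB.Pairwise (fun u w => pvSnd l u < pvSnd l w) ∧
      (∀ v, v ∈ vsB ↔ v ∈ l ∧ 1 < (pvOcc l v).length) := by
  induction l using List.reverseRecOn with
  | nil => exact ⟨[], rfl, by simp, by simp⟩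
  | append_singleton l x ih =>
      obtain ⟨vsB, hmap, hpair, hmem⟩ := ih
      have hlen1 : ∀ v ∈ vsB, 1 < (pvOcc l v).length := fun v hv => ((hmem v).1 hv).2
      have hdlt : ∀ v ∈ vsB, pvDlt (l ++ [x]) v = pvDlt l v :=
        fun v hv => pvDlt_append _ _ _ (hlen1 v hv)
      have hsnd : ∀ v ∈ vsB, pvSnd (l ++ [x]) v = pvSnd l v :=
        fun v hv => pvSnd_append _ _ _ (hlen1 v hv)
      have hmapB : vsB.map (fun v => (pvDlt (l ++ [x]) v, v)) = pvSecs l := by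
        rw [List.map_congr_left (fun v hv => by rw [hdlt v hv]), hmap]
      have hpairB : vsB.Pairwise (fun u w => pvSnd (l ++ [x]) u < pvSnd (l ++ [x]) w) :=
        hpair.imp_of_mem (fun {a b} ha hb hab => by rwa [hsnd a ha, hsnd b hb])
      have hcnt : ∀ v, (pvOcc (l ++ [x]) v).length = l.count v + (if x = v then 1 else 0) := by
        intro v
        rw [pvOcc_length, List.count_append]
        by_cases h : x = v <;> simp [h]
      by_cases hc : l.count x = 1
      · refine ⟨vsB ++ [x], ?_, ?_, ?_⟩
        · rw [pvSecs_append, if_pos hc, List.map_append, hmapB, List.map_singleton]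
          congr 2
          have hxl : x ∈ l := List.count_pos_iff.1 (by omega)
          rw [pvDlt, pvSnd_new _ _ hc, pvFst_append _ _ _ hxl]
        · rw [List.pairwise_append]
          refine ⟨hpairB, by simp, ?_⟩
          intro u hu b hb
          have hb' : b = x := by simpa using hb
          subst hb'
          rw [hsnd u hu, pvSnd_new _ _ hc]
          have h1 := hlen1 u hu
          have := (pvOcc_bounds l u _ (pvSnd_mem l u h1)).2
          omega
        · intro v
          rw [List.mem_append, hmem v, List.mem_singleton]
          constructor
          · rintro (⟨hv, hl⟩ | rfl)
            · refine ⟨List.mem_append_left _ hv, ?_⟩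
              rw [hcnt]
              rw [pvOcc_length] at hl
              split <;> omega
            · refine ⟨List.mem_append_right _ (by simp), ?_⟩
              rw [hcnt, if_pos rfl]
              omega
          · rintro ⟨hv, hl⟩
            by_cases hvx : v = x
            · right; exact hvx
            · left
              rcases List.mem_append.1 hv with h | h
              · refine ⟨h, ?_⟩
                rw [pvOcc_length]
                rw [hcnt, if_neg (fun h' => hvx h'.symm)] at hl
                omega
              · exact absurd (by simpa using h) hvx
      · refine ⟨vsB, ?_, hpairB, ?_⟩
        · rw [pvSecs_append, if_neg hc, List.append_nil, hmapB]
        · intro v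
          rw [hmem v]
          by_cases hvx : v = x
          · subst hvx
            rcases Nat.lt_or_ge (l.count v) 1 with h0 | h2
            · have hnl : v ∉ l := List.count_eq_zero.1 (by omega)
              constructor
              · rintro ⟨hv, _⟩; exact absurd hv hnl
              · rintro ⟨_, hl⟩
                rw [hcnt, if_pos rfl] at hl
                omega
            · have h2' : 2 ≤ l.count v := by omega
              have hvl : v ∈ l := List.count_pos_iff.1 (by omega)
              constructor
              · rintro ⟨hv, hl⟩
                exact ⟨List.mem_append_left _ hv, by rw [hcnt, if_pos rfl]; omega⟩
              · rintro ⟨_, _⟩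
                exact ⟨hvl, by rw [pvOcc_length]; omega⟩
          · constructor
            · rintro ⟨hv, hl⟩
              refine ⟨List.mem_append_left _ hv, ?_⟩
              rw [hcnt, if_neg (fun h' => hvx h'.symm)]
              rw [pvOcc_length] at hl
              omega
            · rintro ⟨hv, hl⟩
              have hv' : v ∈ l := by
                rcases List.mem_append.1 hv with h | h
                · exact h
                · exact absurd (by simpa using h) hvx
              refine ⟨hv', ?_⟩
              rw [pvOcc_length]
              rw [hcnt, if_neg (fun h' => hvx h'.symm)] at hl
              omega
lemma pvPick_append {α : Type} (cs : List (Int × α)) (c : Int × α) :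
    pvPick (cs ++ [c]) = match pvPick cs with
      | none => some c
      | some b => if c.1 > b.1 then some c else some b := by
  rw [pvPick, List.foldl_append, ← pvPick]
  rfl
lemma pvFilterMap_occ (l : List Int) (v : Int) :
    (PySem.List.enumerate l 0).filterMap (fun p => if p.2 = v then some p.1 else none)
      = pvOcc l v := by
  rw [pvOcc]
  generalize PySem.List.enumerate l 0 = xs
  induction xs with
  | nil => rfl
  | cons p ps ih =>
      by_cases h : p.2 = v <;>
        simp [h, ih]
lemma pvB_inv (l : List Int) :
    (∀ v, ((PySem.List.enumerate l 0).foldl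
      (fun (st : PySem.Dict Int (Option Int) × Option (Int × Int)) p =>
        match st.1.get? p.2 with
        | none => (st.1.insert p.2 (some p.1), st.2)
        | some none => st
        | some (some f) =>
            let d := p.1 - f
            let best' := match st.2 with
              | none => some (d, p.2)
              | some b => if d > b.1 then some (d, p.2) else some b
            (st.1.insert p.2 none, best'))
      (PySem.Dict.empty, none)).1.get? v
        = (if l.count v = 0 then none
           else some (if l.count v = 1 then some (pvFst l v) else none))) ∧
    ((PySem.List.enumerate l 0).foldl
      (fun (st : PySem.Dict Int (Option Int) × Option (Int × Int)) p =>
        match st.1.get? p.2 with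
        | none => (st.1.insert p.2 (some p.1), st.2)
        | some none => st
        | some (some f) =>
            let d := p.1 - f
            let best' := match st.2 with
              | none => some (d, p.2)
              | some b => if d > b.1 then some (d, p.2) else some b
            (st.1.insert p.2 none, best'))
      (PySem.Dict.empty, none)).2 = pvPick (pvSecs l) := by
  induction l using List.reverseRecOn with
  | nil =>
      constructor
      · intro v
        simp [PySem.List.enumerate_nil, PySem.Dict.get?_empty]
      · simp [PySem.List.enumerate_nil, pvSecs, pvPick]
  | append_singleton l x ih =>
      obtain ⟨ih1, ih2⟩ := ih
      have henum : PySem.List.enumerate (l ++ [x]) 0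
          = PySem.List.enumerate l 0 ++ [((l.length : Int), x)] := by
        rw [PySem.List.enumerate_append, PySem.List.enumerate_cons, PySem.List.enumerate_nil]
        norm_num
      rw [henum]
      simp only [List.foldl_append, List.foldl_cons, List.foldl_nil]
      have hx := ih1 x
      have hside : ∀ v, v ≠ x → (l ++ [x]).count v = l.count v := by
        intro v hv
        have hxv : ¬ x = v := fun h => hv h.symm
        simp [List.count_append, hxv]
      rcases Nat.lt_trichotomy (l.count x) 1 with h0 | h1 | h2
      · -- x not yet seen
        have h0' : l.count x = 0 := by omega
        have hnx : x ∉ l := List.count_eq_zero.1 h0'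
        rw [if_pos h0'] at hx
        rw [hx]
        constructor
        · intro v
          rcases eq_or_ne v x with rfl | hv
          · rw [PySem.Dict.get?_insert_self]
            have hcv : (l ++ [v]).count v = 1 := by
              simp [List.count_append, h0']
            rw [hcv]
            norm_num
            exact (pvFst_new _ _ hnx).symm
          · rw [PySem.Dict.get?_insert_of_ne _ _ hv, ih1 v, hside v hv]
            by_cases hc1 : l.count v = 1
            · have hvl : v ∈ l := List.count_pos_iff.1 (by omega)
              simp [hc1, pvFst_append _ _ _ hvl]
            · by_cases hc0 : l.count v = 0 <;> simp [hc0, hc1]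
        · rw [ih2, pvSecs_append, if_neg (by omega), List.append_nil]
      · -- second occurrence of x
        have hxl : x ∈ l := List.count_pos_iff.1 (by omega)
        rw [if_neg (by omega), if_pos h1] at hx
        rw [hx]
        constructor
        · intro v
          rcases eq_or_ne v x with rfl | hv
          · rw [PySem.Dict.get?_insert_self]
            have hcv : (l ++ [v]).count v = 2 := by
              simp [List.count_append, h1]
            rw [hcv]
            norm_num
          · rw [PySem.Dict.get?_insert_of_ne _ _ hv, ih1 v, hside v hv]
            by_cases hc1 : l.count v = 1
            · have hvl : v ∈ l := List.count_pos_iff.1 (by omega)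
              simp [hc1, pvFst_append _ _ _ hvl]
            · by_cases hc0 : l.count v = 0 <;> simp [hc0, hc1]
        · rw [pvSecs_append, if_pos h1, pvPick_append, ← ih2]
          rcases hpk : (List.foldl
              (fun (st : PySem.Dict Int (Option Int) × Option (Int × Int)) p =>
                match st.1.get? p.2 with
                | none => (st.1.insert p.2 (some p.1), st.2)
                | some none => st
                | some (some f) =>
                  let d := p.1 - f
                  let best' := match st.2 with
                    | none => some (d, p.2)
                    | some b => if d > b.1 then some (d, p.2) else some b
                  (st.1.insert p.2 none, best'))
              (PySem.Dict.empty, none) (PySem.List.enumerate l 0)).2 with _ | b <;>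
            simp [hpk]
      · -- third or later occurrence
        rw [if_neg (by omega), if_neg (by omega)] at hx
        rw [hx]
        constructor
        · intro v
          rw [ih1 v]
          rcases eq_or_ne v x with rfl | hv
          · have hcv : (l ++ [v]).count v = l.count v + 1 := by
              simp [List.count_append]
            rw [hcv]
            have hne0 : l.count v ≠ 0 := by omega
            have hne1 : l.count v ≠ 1 := by omega
            simp [hne0, hne1]
          · rw [hside v hv]
            by_cases hc1 : l.count v = 1
            · have hvl : v ∈ l := List.count_pos_iff.1 (by omega)
              simp [hc1, pvFst_append _ _ _ hvl]
            · by_cases hc0 : l.count v = 0 <;> simp [hc0, hc1]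
        · rw [ih2, pvSecs_append, if_neg (by omega), List.append_nil]
lemma pvFoldl_filterP {α β : Type} (q : β → Prop) [DecidablePred q] (g : α → β → α) (i : α) (l : List β) :
    List.foldl (fun a x => if q x then g a x else a) i l
      = List.foldl g i (l.filter (fun x => decide (q x))) := by
  induction l generalizing i with
  | nil => rfl
  | cons x xs ih =>
      by_cases h : q x <;> simp [h, ih]

lemma pvDlt_pos_mem (l : List Int) :
    ∀ c ∈ (pvVsA l).map (fun v => (pvDlt l v, v)), 1 ≤ c.1 := by
  intro c hc
  obtain ⟨v, hv, rfl⟩ := List.mem_map.1 hc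
  exact pvDlt_pos l v ((pvVsA_mem l v).1 hv).2

lemma pvA_eq (l : List Int) :
    find_repeated_locs l = (match pvPick ((pvVsA l).map (fun v => (pvDlt l v, v))) with
      | none => [0, (l.length : Int)]
      | some c => pvOcc l c.2) := by
  simp only [find_repeated_locs]
  rw [pvItemsA, List.foldl_map]
  simp only [PySem.List.pyGetD_ofNat']
  rw [pvFoldl_filterP (fun v : Int => 1 < (pvOcc l v).length)
    (fun (st : Int × List Int) v =>
      if (pvOcc l v).getD 1 0 - (pvOcc l v).getD 0 0 > st.1
      then ((pvOcc l v).getD 1 0 - (pvOcc l v).getD 0 0, pvOcc l v) else st) (0, []) _, ← pvVsA]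
  have hmm : List.foldl
      (fun (st : Int × List Int) v =>
        if (pvOcc l v).getD 1 0 - (pvOcc l v).getD 0 0 > st.1
        then ((pvOcc l v).getD 1 0 - (pvOcc l v).getD 0 0, pvOcc l v) else st) (0, []) (pvVsA l)
      = (pvPick ((pvVsA l).map (fun v => (pvDlt l v, pvOcc l v)))).getD (0, []) := by
    rw [← pvPick_foldl _ _ (by
      intro c hc
      obtain ⟨v, hv, rfl⟩ := List.mem_map.1 hc
      exact pvDlt_pos l v ((pvVsA_mem l v).1 hv).2), List.foldl_map]
    rfl
  rw [hmm]
  have hmap2 : (pvVsA l).map (fun v => (pvDlt l v, pvOcc l v))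
      = ((pvVsA l).map (fun v => (pvDlt l v, v))).map (fun c => (c.1, pvOcc l c.2)) := by
    rw [List.map_map]; rfl
  rw [hmap2, pvPick_map]
  rcases eq_or_ne (pvVsA l) [] with h0 | h0
  · rw [h0]; rfl
  · obtain ⟨k, hk, hpick, -, -⟩ := pvPick_spec ((pvVsA l).map (fun v => (pvDlt l v, v)))
      (by simpa using h0)
    rw [hpick]
    have hpos : 1 ≤ (((pvVsA l).map (fun v => (pvDlt l v, v)))[k]).1 :=
      pvDlt_pos_mem l _ (List.getElem_mem hk)
    simp only [Option.map_some, Option.getD_some]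
    rw [if_neg (by omega)]

lemma pvB_eq (l : List Int) :
    find_repeated_locs_alt l = (match pvPick ((pvVsA l).map (fun v => (pvDlt l v, v))) with
      | none => [0, (l.length : Int)]
      | some c => pvOcc l c.2) := by
  simp only [find_repeated_locs_alt]
  rw [(pvB_inv l).2]
  obtain ⟨vsB, hmap, hpair, hmem⟩ := pvSecs_spec l
  have hndB : vsB.Nodup :=
    hpair.imp (fun {a b} hab heq => by rw [heq] at hab; exact lt_irrefl _ hab)
  have hperm : vsB.Perm (pvVsA l) :=
    (List.perm_ext_iff_of_nodup hndB (pvVsA_nodup l)).2 (fun v => by rw [hmem v, pvVsA_mem])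
  rw [hmap, ← pvPick_bridge l vsB hperm hpair]
  rcases hpk : pvPick ((pvVsA l).map (fun v => (pvDlt l v, v))) with - | c
  · rfl
  · exact pvFilterMap_occ l c.2

-- ===== VERDICT (by name: the statement is the Claim_ definition above) =====
theorem find_repeated_locs_spec : Claim_equal_find_repeated_locs := by
  intro input_list _
  unfold Spec_find_repeated_locs
  rw [pvA_eq, pvB_eq]
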